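-- pv_equiv track=rewrite | github.com/onys-programmer/daily-coding | 202108/20210819/cony_and_brown.py | solution
-- ===== SOURCE A (Python) =====
-- from collections import deque
--
-- def solution(C, B):
--     result = 0
--     time = 1
--     current_C = C
--     dq = deque([B])
--     found = 0
--
--     while True:
--         if current_C > 200000:
--             result = -1
--             break
--         current_C += time
--         for _ in range(len(dq)):
--             num = dq.popleft()
--             b_plus = num + 1
--             b_minus = num - 1
--             b_times = num * 2
--
--             if b_plus == current_C or b_minus == current_C or b_times == current_C:
--                 result = time
--                 found = 1
--                 break
--             else:
--                 dq.append(b_plus)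
--                 dq.append(b_minus)
--                 dq.append(b_times)
--
--         if found:
--             break
--         time += 1
--
--     return result
-- ===== SOURCE B (Python) =====
-- def _preds(y):
--     # inverse images of the moves +1, -1, *2
--     if y % 2 == 0:
--         return (y - 1, y + 1, y // 2)
--     return (y - 1, y + 1)
--
-- def solution(C, B):
--     # Run, for each time t,
--     # a backward BFS from cony's position: brown catches cony at time t iff
--     # B is backward-reachable from cony's position in exactly t steps.
--     time = 1
--     cur = C
--     while True:
--         if cur > 200000:
--             return -1
--         cur += time
--         S = {cur}
--         for _ in range(time):
--             S = {p for y in S for p in _preds(y)}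
--         if B in S:
--             return time
--         time += 1
-- ===== Notes on version B (the rewrite author's own statement) =====
-- stated objective: alternative
-- what changed: Replaces A's forward BFS over a multiset deque of brown's positions by a per-time backward BFS from cony's current position over a deduplicated set of predecessors (y-1, y+1, y/2 if even), testing whether B is backward-reachable in exactly t steps.
import Mathlib
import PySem

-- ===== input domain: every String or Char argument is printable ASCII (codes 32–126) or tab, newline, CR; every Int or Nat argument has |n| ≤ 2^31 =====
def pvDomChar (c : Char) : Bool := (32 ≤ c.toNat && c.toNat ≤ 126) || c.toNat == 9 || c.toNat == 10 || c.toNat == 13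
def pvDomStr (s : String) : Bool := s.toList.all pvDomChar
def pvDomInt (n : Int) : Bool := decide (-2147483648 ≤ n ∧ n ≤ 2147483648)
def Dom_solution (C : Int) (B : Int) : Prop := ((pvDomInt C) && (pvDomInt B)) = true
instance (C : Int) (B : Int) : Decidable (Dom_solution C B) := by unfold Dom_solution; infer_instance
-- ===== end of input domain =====

-- B replaces A's forward multiset deque (which triples every level) by a per-time
-- backward BFS over the set of positions that reach cony's position; equal return values.

-- ===== PORT A =====
-- A's inner `for _ in range(len(dq))` loop: pops each node of the current level,
-- returns none on the `break` (a hit), else some (the next level, children in pop order).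
-- tail-recursive: `acc` holds the already-appended children, newest first
def levelA (c : Int) : List Int → List Int → Option (List Int)
  | [], acc => some acc.reverse
  | n :: rest, acc =>
    if n + 1 = c ∨ n - 1 = c ∨ n * 2 = c then none
    else levelA c rest ((n * 2) :: (n - 1) :: (n + 1) :: acc)

-- A's `while True` loop; Python's `time` is (k : Int) + 1 (time starts at 1 and
-- increases by 1 each round), which makes the termination measure a Nat subtraction.
def solGoA (k : Nat) (c : Int) (dq : List Int) : Int :=
  if _h : c > 200000 then -1
  else
    let c' := c + ((k : Int) + 1)
    match levelA c' dq [] with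
    | none => (k : Int) + 1
    | some dq' => solGoA (k + 1) c' dq'
termination_by (200001 - c).toNat
decreasing_by omega

def solution (C : Int) (B : Int) : Int := solGoA 0 C [B]

-- ===== PORT B =====
-- _preds(y): inverse images of the moves +1, -1, *2
def predsB (y : Int) : List Int :=
  if PySem.Int.mod y 2 == 0 then [y - 1, y + 1, PySem.Int.floordiv y 2]
  else [y - 1, y + 1]

-- the `for _ in range(time): S = {p for y in S for p in _preds(y)}` loop, S₀ = {cur}
def backSet : Nat → Int → PySem.Set Int
  | 0, x => PySem.Set.ofList [x]
  | t + 1, x => PySem.Set.ofList ((backSet t x).flatMap predsB)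

def solGoB (Bp : Int) (k : Nat) (c : Int) : Int :=
  if _h : c > 200000 then -1
  else
    let c' := c + ((k : Int) + 1)
    if PySem.Set.contains (backSet (k + 1) c') Bp then (k : Int) + 1
    else solGoB Bp (k + 1) c'
termination_by (200001 - c).toNat
decreasing_by omega

def solution_alt (C : Int) (B : Int) : Int := solGoB B 0 C

-- ===== PRECONDITION & SPEC =====
def Spec_solution (C : Int) (B : Int) (out : Int) : Prop := out = solution_alt C B
instance (C : Int) (B : Int) (out : Int) : Decidable (Spec_solution C B out) := by unfold Spec_solution; infer_instance

-- ===== CLAIM (what is proved, stated in full; the proofs are below) =====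
def Claim_equal_solution : Prop := ∀ (C : Int) (B : Int), Dom_solution C B → Spec_solution C B (solution C B)

-- ===== LEMMAS AND PROOFS =====

-- children of a brown position (the order A enqueues them)
def childL (n : Int) : List Int := [n + 1, n - 1, n * 2]

-- forward levels: positions brown occupies after k moves (as a multiset/list)
def fwdL : Nat → Int → List Int
  | 0, b => [b]
  | k + 1, b => (fwdL k b).flatMap childL

-- backward levels without dedup
def backL : Nat → Int → List Int
  | 0, x => [x]
  | t + 1, x => (backL t x).flatMap predsB

lemma mem_backSet (t : Nat) (x : Int) : ∀ z, z ∈ backSet t x ↔ z ∈ backL t x := by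
  induction t with
  | zero => intro z; simp [backSet, backL]
  | succ t ih =>
    intro z
    simp only [backSet, backL, PySem.Set.mem_ofList, List.mem_flatMap]
    constructor
    · rintro ⟨y, hy, hz⟩; exact ⟨y, (ih y).mp hy, hz⟩
    · rintro ⟨y, hy, hz⟩; exact ⟨y, (ih y).mpr hy, hz⟩

lemma child_pred_dual (n m : Int) : m ∈ childL n ↔ n ∈ predsB m := by
  simp only [childL, predsB, PySem.Int.mod_eq_emod_of_pos (a := m) (by norm_num : (0:Int) < 2),
    PySem.Int.floordiv_eq_ediv_of_pos (a := m) (by norm_num : (0:Int) < 2)]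
  split_ifs with h
  · simp only [beq_iff_eq] at h
    simp only [List.mem_cons, List.not_mem_nil, or_false]
    omega
  · simp only [beq_iff_eq] at h
    simp only [List.mem_cons, List.not_mem_nil, or_false]
    omega

-- peel backL at the front instead of the back
lemma backL_front (t : Nat) (x : Int) :
    backL (t + 1) x = (predsB x).flatMap (backL t) := by
  induction t generalizing x with
  | zero => simp [backL]
  | succ t ih =>
    show (backL (t + 1) x).flatMap predsB = _
    rw [ih x, List.flatMap_assoc]
    rfl

-- duality: cony's position is forward-reachable from b in t moves
-- iff b is backward-reachable from it in t moves
lemma fwd_back_dual (t : Nat) (b x : Int) : x ∈ fwdL t b ↔ b ∈ backL t x := by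
  induction t generalizing x with
  | zero => simp [fwdL, backL, eq_comm]
  | succ t ih =>
    rw [backL_front]
    simp only [fwdL, List.mem_flatMap]
    constructor
    · rintro ⟨n, hn, hx⟩
      exact ⟨n, (child_pred_dual n x).mp hx, (ih n).mp hn⟩
    · rintro ⟨n, hn, hb⟩
      exact ⟨n, (ih n).mpr hb, (child_pred_dual n x).mpr hn⟩

lemma levelA_none_iff (c : Int) (dq : List Int) : ∀ acc,
    levelA c dq acc = none ↔ ∃ n ∈ dq, n + 1 = c ∨ n - 1 = c ∨ n * 2 = c := by
  induction dq with
  | nil => intro acc; simp [levelA]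
  | cons n rest ih =>
    intro acc
    simp only [levelA]
    split_ifs with h
    · simp [h]
    · rw [ih]
      constructor
      · rintro ⟨m, hm, hc⟩
        exact ⟨m, List.mem_cons_of_mem n hm, hc⟩
      · rintro ⟨m, hm, hc⟩
        rcases List.mem_cons.mp hm with rfl | hm'
        · exact absurd hc h
        · exact ⟨m, hm', hc⟩

lemma levelA_no_hit (c : Int) (dq : List Int)
    (h : ∀ n ∈ dq, ¬(n + 1 = c ∨ n - 1 = c ∨ n * 2 = c)) : ∀ acc,
    levelA c dq acc = some (acc.reverse ++ dq.flatMap childL) := by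
  induction dq with
  | nil => intro acc; simp [levelA]
  | cons n rest ih =>
    intro acc
    simp only [levelA]
    rw [if_neg (h n (by simp)), ih (fun m hm => h m (by simp [hm]))]
    simp [childL]

lemma hit_iff_mem_child (c n : Int) :
    (n + 1 = c ∨ n - 1 = c ∨ n * 2 = c) ↔ c ∈ childL n := by
  simp [childL, eq_comm]

lemma go_eq (Bp : Int) : ∀ (m k : Nat) (c : Int) (dq : List Int),
    (200001 - c).toNat = m → (∀ z, z ∈ dq ↔ z ∈ fwdL k Bp) →
    solGoA k c dq = solGoB Bp k c := by
  intro m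
  induction m using Nat.strong_induction_on with
  | _ m IH =>
    intro k c dq hm hinv
    rw [solGoA, solGoB]
    split_ifs with h
    · rfl
    · have hhit : (levelA (c + ((k : Int) + 1)) dq [] = none) ↔
          PySem.Set.contains (backSet (k + 1) (c + ((k : Int) + 1))) Bp = true := by
        rw [levelA_none_iff _ dq [], PySem.Set.contains_iff, mem_backSet, ← fwd_back_dual]
        simp only [fwdL, List.mem_flatMap]
        constructor
        · rintro ⟨n, hn, hc⟩
          exact ⟨n, (hinv n).mp hn, (hit_iff_mem_child _ n).mp hc⟩
        · rintro ⟨n, hn, hc⟩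
          exact ⟨n, (hinv n).mpr hn, (hit_iff_mem_child _ n).mpr hc⟩
      cases hl : levelA (c + ((k : Int) + 1)) dq [] with
      | none =>
        simp only [hl, hhit.mp hl, if_true]
      | some dq' =>
        simp only [hl,
          if_neg (show ¬((backSet (k + 1) (c + ((k : Int) + 1))).contains Bp = true) by
            intro hb; rw [hhit.mpr hb] at hl; exact absurd hl (by simp))]
        have hno : ∀ n ∈ dq, ¬(n + 1 = c + ((k : Int) + 1) ∨ n - 1 = c + ((k : Int) + 1)
            ∨ n * 2 = c + ((k : Int) + 1)) := by
          intro n hn hc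
          rw [(levelA_none_iff _ dq []).mpr ⟨n, hn, hc⟩] at hl
          exact absurd hl (by simp)
        have hdq' : dq' = dq.flatMap childL := by
          rw [levelA_no_hit _ _ hno []] at hl
          have := (Option.some_injective _ hl).symm
          simpa using this
        refine IH ((200001 - (c + ((k : Int) + 1))).toNat) (by omega) (k + 1) _ _ rfl ?_
        intro z
        subst hdq'
        simp only [fwdL, List.mem_flatMap]
        constructor
        · rintro ⟨n, hn, hz⟩; exact ⟨n, (hinv n).mp hn, hz⟩
        · rintro ⟨n, hn, hz⟩; exact ⟨n, (hinv n).mpr hn, hz⟩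

-- ===== VERDICT (by name: the statement is the Claim_ definition above) =====
theorem solution_spec : Claim_equal_solution := by
  intro C B _
  unfold Spec_solution solution solution_alt
  exact go_eq B _ 0 C [B] rfl (fun z => by simp [fwdL])
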